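-- pv_equiv track=rewrite | github.com/windindicator/math4900_graph_coloring | Recursive_Largest_First.py | update_u1
-- ===== SOURCE A (Python) =====
-- def update_u1(graph, color, k):
--     u1 = []
--     u2 = []
--     for i in range(len(graph[0])):
--         if color[i] == 0:
--             is_u1 = True
--             for j in range(len(graph[i])):
--                 if graph[i][j] == 1 and color[j] == k:
--                     is_u1 = False
--                     break
--             if is_u1:
--                 u1.append(i)
--             else:
--                 u2.append(i)
--     return u1, u2
-- ===== SOURCE B (Python) =====
-- def update_u1(graph, color, k):
--     n = len(graph[0])
--     ks = [j for j in range(len(color)) if color[j] == k]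
--     mark = [False] * n
--     for j in ks:
--         for i in range(n):
--             if color[i] == 0 and j < len(graph[i]) and graph[i][j] == 1:
--                 mark[i] = True
--     u1 = []
--     u2 = []
--     for i in range(n):
--         if color[i] == 0:
--             if mark[i]:
--                 u2.append(i)
--             else:
--                 u1.append(i)
--     return u1, u2
-- ===== Notes on version B (the rewrite author's own statement) =====
-- stated objective: alternative
-- what changed: B inverts A's per-vertex row re-scan into a source-mark pass: it first collects the k-colored vertices, marks every uncolored vertex adjacent to one of them in a boolean table, then classifies vertices by the mark in a single final pass.
-- outside the precondition, e.g. on update_u1([[0, 0], [0, 0, 0]], [0, 0], 1): A returns ([0, 1], []), B returns ([0, 1], [])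
import Mathlib
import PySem

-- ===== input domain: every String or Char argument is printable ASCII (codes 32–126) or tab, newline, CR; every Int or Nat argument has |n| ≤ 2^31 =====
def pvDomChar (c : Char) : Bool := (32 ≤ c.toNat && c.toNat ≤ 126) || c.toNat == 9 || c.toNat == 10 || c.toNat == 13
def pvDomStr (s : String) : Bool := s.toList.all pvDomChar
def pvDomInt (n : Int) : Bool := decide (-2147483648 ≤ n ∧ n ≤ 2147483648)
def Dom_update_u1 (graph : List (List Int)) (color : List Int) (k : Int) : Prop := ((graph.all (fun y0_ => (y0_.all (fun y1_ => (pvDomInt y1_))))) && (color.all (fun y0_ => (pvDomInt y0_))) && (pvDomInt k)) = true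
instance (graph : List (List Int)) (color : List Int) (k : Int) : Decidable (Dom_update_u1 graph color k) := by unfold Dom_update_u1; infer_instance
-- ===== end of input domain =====

-- B replaces A's per-vertex row re-scan by a source-mark pass over the k-colored
-- vertices (alternative decomposition, same asymptotic cost).

-- ===== PORT A =====
-- inner loop of A: 'for j in range(len(graph[i])): if graph[i][j]==1 and color[j]==k: is_u1=False; break'
def aInnerGo (row : List Int) (color : List Int) (k : Int) : List Int → Bool
  | [] => true
  | j :: js =>
      if PySem.List.pyGetD row j 0 == 1 && PySem.List.pyGetD color j 0 == k then false
      else aInnerGo row color k js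

def update_u1 (graph : List (List Int)) (color : List Int) (k : Int) : List Int × List Int :=
  (PySem.List.pyRange 0 ((PySem.List.pyGetD graph 0 []).length : Int) 1).foldl
    (fun (acc : List Int × List Int) i =>
      if PySem.List.pyGetD color i 0 == 0 then
        if aInnerGo (PySem.List.pyGetD graph i []) color k
            (PySem.List.pyRange 0 (((PySem.List.pyGetD graph i []).length : Int)) 1) then
          (acc.1 ++ [i], acc.2)
        else
          (acc.1, acc.2 ++ [i])
      else acc) ([], [])

-- ===== PORT B =====
-- B: 'ks = [j for j in range(len(color)) if color[j] == k]'
def bKs (color : List Int) (k : Int) : List Int :=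
  (PySem.List.pyRange 0 (color.length : Int) 1).filter
    (fun j => PySem.List.pyGetD color j 0 == k)

-- condition of B's marking loop body: 'color[i] == 0 and j < len(graph[i]) and graph[i][j] == 1'
def bMarkCond (graph : List (List Int)) (color : List Int) (j i : Int) : Bool :=
  PySem.List.pyGetD color i 0 == 0 &&
  decide (j < ((PySem.List.pyGetD graph i []).length : Int)) &&
  PySem.List.pyGetD (PySem.List.pyGetD graph i []) j 0 == 1

-- B: 'mark = [False]*n; for j in ks: for i in range(n): if …: mark[i] = True'
def bMark (graph : List (List Int)) (color : List Int) (k : Int) : List Bool :=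
  (bKs color k).foldl
    (fun mark j =>
      (PySem.List.pyRange 0 ((PySem.List.pyGetD graph 0 []).length : Int) 1).foldl
        (fun mark i => if bMarkCond graph color j i then mark.set i.toNat true else mark)
        mark)
    (List.replicate (PySem.List.pyGetD graph 0 []).length false)

def update_u1_alt (graph : List (List Int)) (color : List Int) (k : Int) : List Int × List Int :=
  (PySem.List.pyRange 0 ((PySem.List.pyGetD graph 0 []).length : Int) 1).foldl
    (fun (acc : List Int × List Int) i =>
      if PySem.List.pyGetD color i 0 == 0 then
        if (bMark graph color k).getD i.toNat false then (acc.1, acc.2 ++ [i])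
        else (acc.1 ++ [i], acc.2)
      else acc) ([], [])

-- ===== PRECONDITION & SPEC =====
-- Pre_ excludes exactly the shapes on which Python A raises an IndexError (empty graph,
-- color shorter than row 0, an uncolored vertex without a row), plus — slightly wider,
-- to stay closed-form — uncolored rows extending past len(color): whether A raises on
-- those depends on the scan order of its inner loop, and A and B agree whenever A returns.
def Pre_update_u1 (graph : List (List Int)) (color : List Int) (k : Int) : Prop :=
  graph ≠ [] ∧ (graph.headD []).length ≤ color.length ∧
  ∀ i : Nat, i < (graph.headD []).length → color.getD i 1 = 0 →
    i < graph.length ∧ (graph.getD i []).length ≤ color.length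
instance (graph : List (List Int)) (color : List Int) (k : Int) : Decidable (Pre_update_u1 graph color k) := by unfold Pre_update_u1; infer_instance

def pvWitness_update_u1 : List (List Int) × List Int × Int := ([[0, 1], [1, 0]], ([0, 0], 1))

def Spec_update_u1 (graph : List (List Int)) (color : List Int) (k : Int) (out : List Int × List Int) : Prop := out = update_u1_alt graph color k
instance (graph : List (List Int)) (color : List Int) (k : Int) (out : List Int × List Int) : Decidable (Spec_update_u1 graph color k out) := by unfold Spec_update_u1; infer_instance

-- ===== CLAIM (what is proved, stated in full; the proofs are below) =====
def Claim_equal_update_u1 : Prop := ∀ (graph : List (List Int)) (color : List Int) (k : Int), Dom_update_u1 graph color k → Pre_update_u1 graph color k → Spec_update_u1 graph color k (update_u1 graph color k)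

-- ===== LEMMAS AND PROOFS =====

theorem update_u1_witness_ok :
    Dom_update_u1 pvWitness_update_u1.1 pvWitness_update_u1.2.1 pvWitness_update_u1.2.2 ∧
    Pre_update_u1 pvWitness_update_u1.1 pvWitness_update_u1.2.1 pvWitness_update_u1.2.2 := by
  decide

-- A's inner loop (with break) computes the negation of a List.any
theorem aInnerGo_eq_any (row color : List Int) (k : Int) (js : List Int) :
    aInnerGo row color k js
      = !(js.any (fun j => PySem.List.pyGetD row j 0 == 1 && PySem.List.pyGetD color j 0 == k)) := by
  induction js with
  | nil => simp [aInnerGo]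
  | cons j js ih =>
      simp only [aInnerGo, List.any_cons]
      split_ifs with h
      · simp [h]
      · simp [h, ih]

theorem getD_set_true (m : List Bool) (p t : Nat) :
    (m.set p true).getD t false
      = (m.getD t false || (decide (p = t) && decide (t < m.length))) := by
  by_cases hp : p = t
  · subst hp
    by_cases hl : p < m.length
    · simp [List.getD, hl]
    · simp [List.getD, hl, List.set_eq_of_length_le (Nat.le_of_not_lt hl)]
  · simp [List.getD, hp]

theorem length_foldl_set {α : Type} (l : List α) (c : α → Bool) (f : α → Nat) (m : List Bool) :
    (l.foldl (fun m x => if c x then m.set (f x) true else m) m).length = m.length := by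
  induction l generalizing m with
  | nil => rfl
  | cons x l ih =>
      simp only [List.foldl_cons]
      split_ifs with h <;> simp [ih]

-- one fold level of conditional set, characterised at index t
theorem getD_foldl_set {α : Type} (l : List α) (c : α → Bool) (f : α → Nat) (m : List Bool) (t : Nat) :
    (l.foldl (fun m x => if c x then m.set (f x) true else m) m).getD t false
      = (m.getD t false || l.any (fun x => c x && decide (f x = t) && decide (t < m.length))) := by
  induction l generalizing m with
  | nil => simp
  | cons x l ih =>
      simp only [List.foldl_cons, List.any_cons]
      split_ifs with h
      · rw [ih, getD_set_true]
        simp [h, List.length_set, Bool.or_assoc]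
      · rw [ih]
        simp [h]

-- both fold levels: after the marking phase, index t holds iff some (j, i) pair fired with i = t
theorem getD_bMark_gen (graph : List (List Int)) (color : List Int) (ks : List Int) (t : Nat)
    (m : List Bool) (hlen : m.length = (PySem.List.pyGetD graph 0 []).length) :
    ((ks.foldl (fun mark j =>
        (PySem.List.pyRange 0 ((PySem.List.pyGetD graph 0 []).length : Int) 1).foldl
          (fun mark i => if bMarkCond graph color j i then mark.set i.toNat true else mark)
          mark) m).getD t false)
      = (m.getD t false ||
          ks.any (fun j =>
            (PySem.List.pyRange 0 ((PySem.List.pyGetD graph 0 []).length : Int) 1).any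
              (fun i => bMarkCond graph color j i && decide (i.toNat = t) &&
                        decide (t < (PySem.List.pyGetD graph 0 []).length)))) := by
  induction ks generalizing m with
  | nil => simp
  | cons j ks ih =>
      simp only [List.foldl_cons, List.any_cons]
      rw [ih _ (by rw [length_foldl_set, hlen])]
      rw [getD_foldl_set, hlen]
      simp [Bool.or_assoc]

theorem getD_bMark (graph : List (List Int)) (color : List Int) (k : Int) (t : Nat) :
    (bMark graph color k).getD t false
      = (bKs color k).any (fun j =>
          (PySem.List.pyRange 0 ((PySem.List.pyGetD graph 0 []).length : Int) 1).any
            (fun i => bMarkCond graph color j i && decide (i.toNat = t) &&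
                      decide (t < (PySem.List.pyGetD graph 0 []).length))) := by
  unfold bMark
  rw [getD_bMark_gen graph color _ t _ (by simp)]
  simp

-- the pointwise bridge: for an uncolored vertex t < n, B's mark is the negation of A's inner scan
theorem mark_eq_inner (graph : List (List Int)) (color : List Int) (k : Int)
    (t : Nat) (ht : t < (PySem.List.pyGetD graph 0 []).length)
    (hc : PySem.List.pyGetD color (t : Int) 0 = 0)
    (hrow : (PySem.List.pyGetD graph (t : Int) []).length ≤ color.length) :
    (bMark graph color k).getD t false
      = !(aInnerGo (PySem.List.pyGetD graph (t : Int) []) color k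
          (PySem.List.pyRange 0 (((PySem.List.pyGetD graph (t : Int) []).length : Int)) 1)) := by
  rw [getD_bMark, aInnerGo_eq_any, Bool.not_not]
  unfold bKs
  rw [Bool.eq_iff_iff]
  simp only [bMarkCond, List.any_eq_true, List.mem_filter, PySem.List.mem_pyRange_one,
    Bool.and_eq_true, decide_eq_true_eq, beq_iff_eq]
  constructor
  · rintro ⟨j, ⟨⟨hj0, hjc⟩, hck⟩, i, ⟨hi0, hin⟩, ⟨⟨⟨hc0, hjlt⟩, hg1⟩, hit⟩, htn⟩
    have hit' : i = (t : Int) := by omega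
    subst hit'
    exact ⟨j, ⟨hj0, by exact_mod_cast hjlt⟩, hg1, hck⟩
  · rintro ⟨j, ⟨hj0, hjlt⟩, hg1, hck⟩
    exact ⟨j, ⟨⟨hj0, by omega⟩, hck⟩, (t : Int), ⟨by omega, by exact_mod_cast ht⟩,
      ⟨⟨⟨hc, by exact_mod_cast hjlt⟩, hg1⟩, by simp⟩, ht⟩

-- ===== VERDICT (by name: the statement is the Claim_ definition above) =====
theorem update_u1_spec : Claim_equal_update_u1 := by
  intro graph color k _hdom hpre
  obtain ⟨hne, hn, hrows⟩ := hpre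
  unfold Spec_update_u1 update_u1 update_u1_alt
  apply PySem.List.foldl_congr_mem
  intro acc i hi
  rw [PySem.List.mem_pyRange_one] at hi
  obtain ⟨hi0, hin⟩ := hi
  by_cases hc : PySem.List.pyGetD color i 0 = 0
  · have hit : i = ((i.toNat : Nat) : Int) := by omega
    have ht : i.toNat < (PySem.List.pyGetD graph 0 []).length := by omega
    have hhead : PySem.List.pyGetD graph 0 [] = graph.headD [] := by
      cases graph with
      | nil => simp at hne
      | cons g gs => simp [PySem.List.pyGetD]
    have hc' : color.getD i.toNat 1 = 0 := by
      rw [hit] at hc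
      simp only [PySem.List.pyGetD_natCast] at hc
      have htc : i.toNat < color.length := by rw [hhead] at ht; omega
      rw [List.getD_eq_getElem _ _ htc]
      rw [List.getD_eq_getElem _ _ htc] at hc
      exact hc
    have hrow := hrows i.toNat (by rw [hhead] at ht; exact ht) hc'
    have hrow' : (PySem.List.pyGetD graph ((i.toNat : Nat) : Int) []).length ≤ color.length := by
      simp only [PySem.List.pyGetD_natCast]
      exact hrow.2
    have hmark := mark_eq_inner graph color k i.toNat ht (by rw [← hit]; exact hc) hrow'
    rw [← hit] at hmark
    simp only [hc, if_pos, beq_self_eq_true, hmark]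
    cases haux : aInnerGo (PySem.List.pyGetD graph i []) color k
        (PySem.List.pyRange 0 (((PySem.List.pyGetD graph i []).length : Int)) 1) <;> simp
  · have : (PySem.List.pyGetD color i 0 == 0) = false := by simp [hc]
    simp [this]
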